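-- pv_equiv track=rewrite | github.com/GizawAAiT/Codeforces | A_Do_Not_Be_Distracted.py | solve
-- ===== SOURCE A (Python) =====
-- def solve(n, tasks):
--     tackled = set()
--     tackled.add(tasks[0])
--
--     for idx in range(1, n):
--         if tasks[idx] in tackled and tasks[idx-1] != tasks[idx]:
--             return 'NO'
--
--         tackled.add(tasks[idx])
--
--     return 'YES'
-- ===== SOURCE B (Python) =====
-- def solve(n, tasks):
--     compressed = [tasks[0]]
--     for idx in range(1, n):
--         if tasks[idx] != tasks[idx - 1]:
--             compressed.append(tasks[idx])
--     return 'YES' if len(set(compressed)) == len(compressed) else 'NO'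
-- ===== Notes on version B (the rewrite author's own statement) =====
-- stated objective: alternative
-- what changed: A interleaves a set-membership test with an early 'NO' return inside one scan; B decomposes the task into two phases: build the run-compressed sequence of the first n tasks, then answer by checking that the compressed list has no duplicates (len(set(.)) == len(.)).
-- outside the precondition, e.g. on solve(7, ['NO ab', '', 'ab,YES,YES', 'NOENSESYSSYY', '', 'NN']): A returns 'NO', B raises IndexError
import Mathlib
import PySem

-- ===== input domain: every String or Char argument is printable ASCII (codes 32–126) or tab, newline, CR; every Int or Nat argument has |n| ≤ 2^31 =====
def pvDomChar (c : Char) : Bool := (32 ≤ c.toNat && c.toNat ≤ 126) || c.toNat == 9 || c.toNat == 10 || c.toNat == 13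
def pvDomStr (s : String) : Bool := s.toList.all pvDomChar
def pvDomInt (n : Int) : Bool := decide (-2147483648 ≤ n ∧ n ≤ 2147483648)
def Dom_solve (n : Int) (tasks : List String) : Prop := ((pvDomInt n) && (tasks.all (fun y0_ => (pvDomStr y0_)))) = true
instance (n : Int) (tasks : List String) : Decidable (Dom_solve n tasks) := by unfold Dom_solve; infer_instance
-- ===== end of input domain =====

-- B replaces A's interleaved early-exit membership scan by a two-phase collapse-then-check-uniqueness decomposition (alternative algorithm, same cost).


-- ===== PORT A =====
-- the 'for idx in range(1, n)' loop with its early 'return NO'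
def solveLoopA (tasks : List String) (tackled : PySem.Set String) : List Int → String
  | [] => "YES"
  | idx :: rest =>
    if PySem.Set.contains tackled (PySem.List.pyGetD tasks idx "") = true ∧
       PySem.List.pyGetD tasks (idx - 1) "" ≠ PySem.List.pyGetD tasks idx "" then
      "NO"
    else
      solveLoopA tasks (PySem.Set.add tackled (PySem.List.pyGetD tasks idx "")) rest

def solve (n : Int) (tasks : List String) : String :=
  let tackled : PySem.Set String := PySem.Set.add PySem.Set.empty (PySem.List.pyGetD tasks 0 "")
  solveLoopA tasks tackled (PySem.List.pyRange 1 n 1)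

-- ===== PORT B =====
-- the 'for idx in range(1, n)' loop appending run heads to 'compressed'
def solveLoopB (tasks : List String) (compressed : List String) : List Int → List String
  | [] => compressed
  | idx :: rest =>
    solveLoopB tasks
      (if PySem.List.pyGetD tasks idx "" ≠ PySem.List.pyGetD tasks (idx - 1) "" then
        compressed ++ [PySem.List.pyGetD tasks idx ""]
      else compressed) rest

def solve_alt (n : Int) (tasks : List String) : String :=
  let compressed := solveLoopB tasks [PySem.List.pyGetD tasks 0 ""] (PySem.List.pyRange 1 n 1)
  if PySem.Set.len (PySem.Set.ofList compressed) = PySem.List.len compressed then "YES" else "NO"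

-- ===== PRECONDITION & SPEC =====
-- Pre_ excludes empty tasks (A raises IndexError on tasks[0]) and n > len(tasks): there A's full scan raises IndexError unless its early 'NO' exit fires first, while B's full scan always raises — B's natural behaviour on these malformed (n, tasks) pairs is to raise too.
def Pre_solve (n : Int) (tasks : List String) : Prop := tasks ≠ [] ∧ n ≤ tasks.length
instance (n : Int) (tasks : List String) : Decidable (Pre_solve n tasks) := by unfold Pre_solve; infer_instance
def pvWitness_solve : Int × List String := (3, ["a", "a", "b"])
def Spec_solve (n : Int) (tasks : List String) (out : String) : Prop := out = solve_alt n tasks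
instance (n : Int) (tasks : List String) (out : String) : Decidable (Spec_solve n tasks out) := by unfold Spec_solve; infer_instance

-- ===== CLAIM (what is proved, stated in full; the proofs are below) =====
def Claim_equal_solve : Prop := ∀ (n : Int) (tasks : List String), Dom_solve n tasks → Pre_solve n tasks → Spec_solve n tasks (solve n tasks)

-- ===== LEMMAS AND PROOFS =====

-- loopB only ever appends to 'compressed'
theorem solveLoopB_prefix (tasks : List String) (idxs : List Int) :
    ∀ compressed : List String, compressed <+: solveLoopB tasks compressed idxs := by
  induction idxs with
  | nil => intro c; exact List.prefix_rfl
  | cons idx rest ih =>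
    intro c
    simp only [solveLoopB]
    split
    · exact List.IsPrefix.trans (List.prefix_append _ _) (ih _)
    · exact ih _

theorem solveLoopB_not_nodup (tasks : List String) (idxs : List Int)
    (compressed : List String) (h : ¬ compressed.Nodup) :
    ¬ (solveLoopB tasks compressed idxs).Nodup := by
  intro hn
  exact h (hn.sublist (solveLoopB_prefix tasks idxs compressed).sublist)

-- len(set(l)) == len(l) iff l has no duplicates
theorem ofList_length_iff_nodup (l : List String) :
    (PySem.Set.ofList l).length = l.length ↔ l.Nodup := by
  induction l using List.reverseRecOn with
  | nil => simp [PySem.Set.ofList_nil]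
  | append_singleton xs x ih =>
    rw [PySem.Set.ofList_append_singleton]
    by_cases hx : x ∈ xs
    · rw [PySem.Set.add_of_mem ((PySem.Set.mem_ofList xs x).2 hx)]
      have hle := PySem.Set.length_ofList_le xs
      simp only [List.length_append, List.length_singleton]
      constructor
      · intro h; omega
      · intro h
        rcases List.nodup_append.1 h with ⟨-, -, hdisj⟩
        exact absurd rfl (hdisj x hx x (by simp))
    · rw [PySem.Set.add_of_not_mem (fun h => hx ((PySem.Set.mem_ofList xs x).1 h))]
      simp only [List.length_append, List.length_singleton]
      constructor
      · intro h
        refine List.Nodup.append (ih.1 (by omega)) (List.nodup_singleton x) ?_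
        intro a ha hb; simp at hb; subst hb; exact hx ha
      · intro h
        rcases List.nodup_append.1 h with ⟨h1, -, -⟩
        have := ih.2 h1; omega

-- main loop invariant: A's early-exit scan equals B's collapse-then-check
theorem loop_invariant (tasks : List String) :
    ∀ (k : Nat) (i n : Int), k = (n - i).toNat →
    ∀ (compressed : List String) (tackled : PySem.Set String) (ys : List String),
    compressed = ys ++ [PySem.List.pyGetD tasks (i - 1) ""] →
    compressed.Nodup →
    (∀ x, x ∈ tackled ↔ x ∈ compressed) →
    solveLoopA tasks tackled (PySem.List.pyRange i n 1) =
      (if (solveLoopB tasks compressed (PySem.List.pyRange i n 1)).Nodup then "YES" else "NO") := by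
  intro k
  induction k with
  | zero =>
    intro i n hk compressed tackled ys hlast hnd hmem
    rw [PySem.List.pyRange_one_eq_nil (by omega)]
    simp [solveLoopA, solveLoopB, hnd]
  | succ k ih =>
    intro i n hk compressed tackled ys hlast hnd hmem
    have hin : i < n := by omega
    rw [PySem.List.pyRange_one_cons hin]
    have hidx : i + 1 - 1 = i := by ring
    simp only [solveLoopA, solveLoopB]
    by_cases hc : PySem.Set.contains tackled (PySem.List.pyGetD tasks i "") = true ∧
        PySem.List.pyGetD tasks (i - 1) "" ≠ PySem.List.pyGetD tasks i ""
    · -- A returns NO; B's compressed gains a duplicate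
      simp only [if_pos hc]
      have htmem : PySem.List.pyGetD tasks i "" ∈ compressed :=
        (hmem _).1 ((PySem.Set.contains_iff tackled _).1 hc.1)
      have hne : PySem.List.pyGetD tasks i "" ≠ PySem.List.pyGetD tasks (i - 1) "" :=
        fun h => hc.2 h.symm
      simp only [if_pos hne]
      have hdup : ¬ (compressed ++ [PySem.List.pyGetD tasks i ""]).Nodup := by
        intro hN
        rcases List.nodup_append.1 hN with ⟨-, -, hdisj⟩
        exact hdisj _ htmem _ (by simp) rfl
      rw [if_neg (solveLoopB_not_nodup tasks _ _ hdup)]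
    · simp only [if_neg hc]
      by_cases hne : PySem.List.pyGetD tasks i "" ≠ PySem.List.pyGetD tasks (i - 1) ""
      · -- t fresh on this run boundary: appended on both sides
        have htnot : PySem.List.pyGetD tasks i "" ∉ compressed := fun h =>
          (fun hcon => hc ⟨hcon, fun h' => hne h'.symm⟩)
            ((PySem.Set.contains_iff tackled _).2 ((hmem _).2 h))
        simp only [if_pos hne]
        have hnd' : (compressed ++ [PySem.List.pyGetD tasks i ""]).Nodup := by
          refine List.Nodup.append hnd (List.nodup_singleton _) ?_
          intro a ha hb; simp at hb; subst hb; exact htnot ha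
        refine ih (i + 1) n (by omega) _ (PySem.Set.add tackled _) compressed ?_ hnd' ?_
        · rw [hidx]
        · intro x
          rw [PySem.Set.mem_add]
          simp [hmem x]
      · -- t equals the previous task: run continues, nothing appended
        rw [not_not] at hne
        simp only [if_neg (by simp [hne] : ¬ PySem.List.pyGetD tasks i "" ≠ PySem.List.pyGetD tasks (i - 1) "")]
        have htmem : PySem.List.pyGetD tasks i "" ∈ compressed := by
          rw [hlast, hne]; simp
        refine ih (i + 1) n (by omega) compressed (PySem.Set.add tackled _) ys ?_ hnd ?_
        · rw [hidx, hlast, hne]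
        · intro x
          rw [PySem.Set.mem_add]
          constructor
          · rintro (h | rfl)
            · exact (hmem x).1 h
            · exact htmem
          · intro h; exact Or.inl ((hmem x).2 h)

-- ===== VERDICT (by name: the statement is the Claim_ definition above) =====
theorem solve_spec : Claim_equal_solve := by
  intro n tasks _ hpre
  unfold Spec_solve solve solve_alt
  have h := loop_invariant tasks (n - 1).toNat 1 n (by omega) [PySem.List.pyGetD tasks 0 ""]
    (PySem.Set.add PySem.Set.empty (PySem.List.pyGetD tasks 0 "")) []
    (by norm_num) (List.nodup_singleton _)
    (by intro x; rw [PySem.Set.mem_add]; simp [PySem.Set.empty])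
  rw [h]
  have hlen := ofList_length_iff_nodup
    (solveLoopB tasks [PySem.List.pyGetD tasks 0 ""] (PySem.List.pyRange 1 n 1))
  simp only [PySem.Set.len, PySem.List.len]
  split_ifs with h1 h2 h2
  · rfl
  · exact absurd (hlen.2 h1) (fun hh => h2 (by exact_mod_cast hh))
  · exact absurd (hlen.1 (by exact_mod_cast h2)) h1
  · rfl
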